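-- pv_equiv track=rewrite | github.com/fujifilmfan/advent_of_code | advent_of_code/advent2020/day10_adapter_array.py | calculate_arrangements
-- ===== SOURCE A (Python) =====
-- def calculate_arrangements(gaps):
--     """Calculate the number of arrangements from gap sizes.
--
--     :param gaps: DICT; contains lists of gap sizes; see note in
--         identify_optional_and_required_adapters()
--     :return: INT; total number of arrangements
--     """
--
--     arrangements = 1
--
--     optional = gaps['optional']
--     required = gaps['required']
--
--     for num in optional:
--         arrangements *= 2**num
--     for num in required:
--         arrangements *= 2**num - 1
--
--     return arrangements
-- ===== SOURCE B (Python) =====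
-- def calculate_arrangements(gaps):
--     """Build the list of integer factors once (bit shifts: 1<<n == 2**n for
--     n >= 0), then multiply them with a balanced divide-and-conquer product."""
--     factors = [(1 << n) - 1 for n in gaps['required']] + [1 << n for n in gaps['optional']]
--
--     def prod(lo, hi):
--         # product of factors[lo:hi]
--         if hi - lo == 0:
--             return 1
--         if hi - lo == 1:
--             return factors[lo]
--         mid = (lo + hi) // 2
--         return prod(lo, mid) * prod(mid, hi)
--
--     return prod(0, len(factors))
-- ===== Notes on version B (the rewrite author's own statement) =====
-- stated objective: alternative
-- what changed: Instead of two sequential multiply-accumulate loops with 2**num, B builds one merged list of integer factors using bit shifts and multiplies it with a recursive balanced divide-and-conquer product tree.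
-- outside the precondition, e.g. on calculate_arrangements({'optional': [-1], 'required': []}): A returns 0.5, B raises ValueError
import Mathlib
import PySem

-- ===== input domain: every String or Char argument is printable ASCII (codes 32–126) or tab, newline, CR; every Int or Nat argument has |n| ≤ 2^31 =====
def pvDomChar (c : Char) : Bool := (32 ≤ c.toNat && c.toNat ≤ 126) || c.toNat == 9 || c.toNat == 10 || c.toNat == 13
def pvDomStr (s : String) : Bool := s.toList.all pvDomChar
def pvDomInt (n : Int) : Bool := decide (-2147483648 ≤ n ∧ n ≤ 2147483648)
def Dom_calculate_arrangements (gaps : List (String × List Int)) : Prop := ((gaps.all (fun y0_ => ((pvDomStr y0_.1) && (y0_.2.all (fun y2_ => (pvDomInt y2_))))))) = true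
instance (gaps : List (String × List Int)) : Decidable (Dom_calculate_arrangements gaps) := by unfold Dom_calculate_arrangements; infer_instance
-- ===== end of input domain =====

-- B builds one merged list of factors (bit shifts) and multiplies it with a recursive
-- balanced divide-and-conquer product tree instead of A's two accumulate loops; alternative
-- structure, not claimed faster.


-- ===== PORT A =====
-- dict access gaps['optional']: first match in the association list (KeyError = none, excluded by Pre_)
def pyLookup (gaps : List (String × List Int)) (k : String) : Option (List Int) :=
  (gaps.find? (fun p => p.1 == k)).map (·.2)

-- 2**num is written 2 ^ num.toNat; exact for num ≥ 0, which Pre_ guarantees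
def calculate_arrangements (gaps : List (String × List Int)) : Int :=
  let arrangements : Int := 1
  let optional := (pyLookup gaps "optional").getD []
  let required := (pyLookup gaps "required").getD []
  let arrangements := optional.foldl (fun acc num => acc * 2 ^ num.toNat) arrangements
  let arrangements := required.foldl (fun acc num => acc * (2 ^ num.toNat - 1)) arrangements
  arrangements

-- ===== PORT B =====
-- 1 << n: exact for n ≥ 0, which Pre_ guarantees (Python raises ValueError for n < 0)
def pyShl1 (n : Int) : Int := 2 ^ n.toNat

-- recursive balanced product of factors[lo:hi]; factors[lo] is in range whenever called
def dcProd (factors : List Int) (lo hi : Nat) : Int :=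
  if _h0 : hi - lo = 0 then 1
  else if _h1 : hi - lo = 1 then factors.getD lo 0
  else
    let mid := (lo + hi) / 2
    dcProd factors lo mid * dcProd factors mid hi
termination_by hi - lo
decreasing_by all_goals omega

def calculate_arrangements_alt (gaps : List (String × List Int)) : Int :=
  let factors :=
    (((pyLookup gaps "required").getD []).map (fun n => pyShl1 n - 1)) ++
    (((pyLookup gaps "optional").getD []).map (fun n => pyShl1 n))
  dcProd factors 0 factors.length

-- ===== PRECONDITION & SPEC =====
-- Pre_ excludes a KeyError (missing 'optional'/'required' key) and negative gap sizes,
-- on which Python's 2**num is a float, not an int of the declared return type.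
def Pre_calculate_arrangements (gaps : List (String × List Int)) : Prop :=
  (pyLookup gaps "optional").isSome = true ∧
  (pyLookup gaps "required").isSome = true ∧
  (((pyLookup gaps "optional").getD []).all (fun n => 0 ≤ n)) = true ∧
  (((pyLookup gaps "required").getD []).all (fun n => 0 ≤ n)) = true
instance (gaps : List (String × List Int)) : Decidable (Pre_calculate_arrangements gaps) := by
  unfold Pre_calculate_arrangements; infer_instance

def pvWitness_calculate_arrangements : (List (String × List Int)) :=
  [("optional", [2, 3]), ("required", [1, 2, 2])]

def Spec_calculate_arrangements (gaps : List (String × List Int)) (out : Int) : Prop := out = calculate_arrangements_alt gaps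
instance (gaps : List (String × List Int)) (out : Int) : Decidable (Spec_calculate_arrangements gaps out) := by unfold Spec_calculate_arrangements; infer_instance

-- ===== CLAIM (what is proved, stated in full; the proofs are below) =====
def Claim_equal_calculate_arrangements : Prop := ∀ (gaps : List (String × List Int)), Dom_calculate_arrangements gaps → Pre_calculate_arrangements gaps → Spec_calculate_arrangements gaps (calculate_arrangements gaps)

-- ===== LEMMAS AND PROOFS =====

-- the divide-and-conquer product is the product of the slice factors[lo:hi]
theorem dcProd_eq (factors : List Int) :
    ∀ n lo hi, hi - lo = n → lo ≤ hi → hi ≤ factors.length →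
      dcProd factors lo hi = ((factors.drop lo).take (hi - lo)).prod := by
  intro n
  induction n using Nat.strong_induction_on with
  | _ n ih =>
    intro lo hi hn hle hlen
    rw [dcProd]
    split_ifs with h0 h1
    · simp [h0]
    · have hlo : lo < factors.length := by omega
      rw [h1, List.getD_eq_getElem _ _ hlo, List.drop_eq_getElem_cons hlo,
          List.take_succ_cons, List.take_zero, List.prod_cons, List.prod_nil, mul_one]
    · have hmid1 : lo < (lo + hi) / 2 := by omega
      have hmid2 : (lo + hi) / 2 < hi := by omega
      show dcProd factors lo ((lo + hi) / 2) * dcProd factors ((lo + hi) / 2) hi = _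
      rw [ih ((lo + hi) / 2 - lo) (by omega) lo _ rfl (by omega) (by omega),
          ih (hi - (lo + hi) / 2) (by omega) _ hi rfl (by omega) hlen]
      have hsplit : hi - lo = ((lo + hi) / 2 - lo) + (hi - (lo + hi) / 2) := by omega
      have hdd : List.drop ((lo + hi) / 2 - lo) (List.drop lo factors)
          = List.drop ((lo + hi) / 2) factors := by
        rw [List.drop_drop]; congr 1; omega
      rw [hsplit, List.take_add, List.prod_append, hdd]

-- pulling the accumulator out of a multiply fold
theorem foldl_mul_out (f : Int → Int) (l : List Int) (a : Int) :
    l.foldl (fun acc n => acc * f n) a = a * (l.map f).prod := by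
  induction l generalizing a with
  | nil => simp
  | cons x xs ih =>
    simp only [List.foldl_cons, List.map_cons, List.prod_cons]
    rw [ih]
    ring

-- ===== VERDICT (by name: the statement is the Claim_ definition above) =====
theorem calculate_arrangements_spec : Claim_equal_calculate_arrangements := by
  intro gaps _ _
  unfold Spec_calculate_arrangements calculate_arrangements calculate_arrangements_alt
  simp only
  rw [dcProd_eq _ _ 0 _ rfl (Nat.zero_le _) le_rfl]
  simp only [List.drop_zero, Nat.sub_zero, List.take_length, List.prod_append]
  rw [foldl_mul_out, foldl_mul_out]
  simp only [pyShl1]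
  ring
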